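-- pv_equiv track=rewrite | github.com/ChahelPaatur/Self-Modifying-Program-Synthesis-via-Online-Library-Evolution | common/object_ops.py | extract_object
-- ===== SOURCE A (Python) =====
-- from typing import List, Dict, Tuple, Set, Optional
--
-- Grid = List[List[int]]
--
-- def extract_object(grid: Grid, component: Set[Tuple[int, int]], bg_color: int = 0) -> Grid:
--     """Extract object as minimal bounding box grid"""
--     if not component:
--         return [[bg_color]]
--
--     rows = [r for r, c in component]
--     cols = [c for r, c in component]
--
--     min_r, max_r = min(rows), max(rows)
--     min_c, max_c = min(cols), max(cols)
--
--     h = max_r - min_r + 1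
--     w = max_c - min_c + 1
--
--     result = [[bg_color] * w for _ in range(h)]
--     for r, c in component:
--         result[r - min_r][c - min_c] = grid[r][c]
--
--     return result
-- ===== SOURCE B (Python) =====
-- def extract_object(grid, component, bg_color=0):
--     """Extract object as minimal bounding box grid (copy/mask over the rectangle)."""
--     if not component:
--         return [[bg_color]]
--     min_r = min(r for r, _ in component)
--     max_r = max(r for r, _ in component)
--     min_c = min(c for _, c in component)
--     max_c = max(c for _, c in component)
--     return [[grid[r][c] if (r, c) in component else bg_color
--              for c in range(min_c, max_c + 1)]
--             for r in range(min_r, max_r + 1)]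
-- ===== Notes on version B (the rewrite author's own statement) =====
-- stated objective: simpler
-- what changed: A allocates a background-filled h×w matrix and mutates it cell by cell over the component; B builds the result directly as a nested comprehension over the whole bounding rectangle with a membership test (copy/mask instead of blank-then-fill).
import Mathlib
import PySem

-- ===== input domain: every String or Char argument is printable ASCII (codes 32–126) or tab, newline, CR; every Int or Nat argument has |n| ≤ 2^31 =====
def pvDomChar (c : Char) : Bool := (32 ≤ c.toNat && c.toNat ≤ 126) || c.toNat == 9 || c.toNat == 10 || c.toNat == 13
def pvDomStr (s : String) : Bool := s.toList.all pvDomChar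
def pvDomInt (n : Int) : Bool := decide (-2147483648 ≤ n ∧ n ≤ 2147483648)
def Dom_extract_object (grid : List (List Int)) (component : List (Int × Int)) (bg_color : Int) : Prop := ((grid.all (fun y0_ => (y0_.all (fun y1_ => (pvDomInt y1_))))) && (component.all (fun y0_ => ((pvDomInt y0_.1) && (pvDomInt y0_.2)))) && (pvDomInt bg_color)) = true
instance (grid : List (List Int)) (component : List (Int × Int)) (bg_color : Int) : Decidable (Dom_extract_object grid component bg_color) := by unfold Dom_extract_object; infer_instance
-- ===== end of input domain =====

-- B replaces A's blank-then-fill mutation loop by a nested comprehension over the bounding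
-- rectangle with a membership test (copy/mask); same values, no mutation.

-- ===== PORT A =====
-- the loop body: result[r - min_r][c - min_c] = grid[r][c]
def pvStepA (grid : List (List Int)) (min_r min_c : Int)
    (res : List (List Int)) (rc : Int × Int) : List (List Int) :=
  PySem.List.pySetD res (rc.1 - min_r)
    (PySem.List.pySetD (PySem.List.pyGetD res (rc.1 - min_r) []) (rc.2 - min_c)
      (PySem.List.pyGetD (PySem.List.pyGetD grid rc.1 []) rc.2 0))

def extract_object (grid : List (List Int)) (component : List (Int × Int)) (bg_color : Int) : List (List Int) :=
  if component = [] then [[bg_color]]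
  else
    let rows := component.map (fun rc => rc.1)
    let cols := component.map (fun rc => rc.2)
    let min_r := (PySem.List.min? rows (fun x => x)).getD 0
    let max_r := (PySem.List.max? rows (fun x => x)).getD 0
    let min_c := (PySem.List.min? cols (fun x => x)).getD 0
    let max_c := (PySem.List.max? cols (fun x => x)).getD 0
    let h := max_r - min_r + 1
    let w := max_c - min_c + 1
    let result := (PySem.List.pyRange 0 h 1).map (fun _ => PySem.List.pyRepeat [bg_color] w)
    component.foldl (pvStepA grid min_r min_c) result

-- ===== PORT B =====
def extract_object_alt (grid : List (List Int)) (component : List (Int × Int)) (bg_color : Int) : List (List Int) :=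
  if component = [] then [[bg_color]]
  else
    let min_r := (PySem.List.min? (component.map (fun rc => rc.1)) (fun x => x)).getD 0
    let max_r := (PySem.List.max? (component.map (fun rc => rc.1)) (fun x => x)).getD 0
    let min_c := (PySem.List.min? (component.map (fun rc => rc.2)) (fun x => x)).getD 0
    let max_c := (PySem.List.max? (component.map (fun rc => rc.2)) (fun x => x)).getD 0
    (PySem.List.pyRange min_r (max_r + 1) 1).map (fun r =>
      (PySem.List.pyRange min_c (max_c + 1) 1).map (fun c =>
        if (r, c) ∈ component then PySem.List.pyGetD (PySem.List.pyGetD grid r []) c 0 else bg_color))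

-- ===== PRECONDITION & SPEC =====
-- Pre_ excludes exactly the inputs where Python 'grid[r][c]' raises IndexError (a component
-- cell indexing outside the grid); negative in-range indices (Python wraparound) stay inside.
def Pre_extract_object (grid : List (List Int)) (component : List (Int × Int)) (bg_color : Int) : Prop :=
  ∀ rc ∈ component, PySem.Raise.InRange grid.length rc.1 ∧
    PySem.Raise.InRange (PySem.List.pyGetD grid rc.1 []).length rc.2
instance (grid : List (List Int)) (component : List (Int × Int)) (bg_color : Int) : Decidable (Pre_extract_object grid component bg_color) := by unfold Pre_extract_object; infer_instance
def pvWitness_extract_object : List (List Int) × (List (Int × Int)) × Int :=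
  ([[1, 2, 3], [4, 5, 6]], [(0, 1), (1, 2)], 0)
def Spec_extract_object (grid : List (List Int)) (component : List (Int × Int)) (bg_color : Int) (out : List (List Int)) : Prop := out = extract_object_alt grid component bg_color
instance (grid : List (List Int)) (component : List (Int × Int)) (bg_color : Int) (out : List (List Int)) : Decidable (Spec_extract_object grid component bg_color out) := by unfold Spec_extract_object; infer_instance

-- ===== CLAIM (what is proved, stated in full; the proofs are below) =====
def Claim_equal_extract_object : Prop := ∀ (grid : List (List Int)) (component : List (Int × Int)) (bg_color : Int), Dom_extract_object grid component bg_color → Pre_extract_object grid component bg_color → Spec_extract_object grid component bg_color (extract_object grid component bg_color)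

-- ===== LEMMAS AND PROOFS =====

-- the grid read both programs perform at a component cell
def pvRead (grid : List (List Int)) (r c : Int) : Int :=
  PySem.List.pyGetD (PySem.List.pyGetD grid r []) c 0

def pvEntry (M : List (List Int)) (i j : Nat) : Int := (M.getD i []).getD j 0
def pvShape (M : List (List Int)) (h w : Nat) : Prop :=
  M.length = h ∧ ∀ row ∈ M, row.length = w

lemma pvStepA_eq_set (grid : List (List Int)) (min_r min_c : Int) (M : List (List Int))
    (rc : Int × Int) (h1 : 0 ≤ rc.1 - min_r) (h2 : rc.1 - min_r < (M.length : Int))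
    (h3 : 0 ≤ rc.2 - min_c) :
    pvStepA grid min_r min_c M rc =
      M.set (rc.1 - min_r).toNat
        ((M.getD (rc.1 - min_r).toNat []).set (rc.2 - min_c).toNat (pvRead grid rc.1 rc.2)) := by
  unfold pvStepA pvRead
  rw [PySem.List.pySetD_of_nonneg _ _ h3, PySem.List.pySetD_of_nonneg _ _ h1,
      PySem.List.pyGetD_eq_getElem _ _ h1 h2,
      List.getD_eq_getElem M [] (by omega)]

lemma pvEntry_set (M : List (List Int)) (h w : Nat) (hM : pvShape M h w)
    (i0 j0 i j : Nat) (hi0 : i0 < h) (hj0 : j0 < w) (v : Int) :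
    pvEntry (M.set i0 ((M.getD i0 []).set j0 v)) i j =
      if i = i0 ∧ j = j0 then v else pvEntry M i j := by
  obtain ⟨hlen, hrows⟩ := hM
  have hi0' : i0 < M.length := by omega
  have hrow : (M.getD i0 []).length = w := by
    rw [List.getD_eq_getElem M [] hi0']
    exact hrows _ (List.getElem_mem hi0')
  unfold pvEntry
  rcases eq_or_ne i i0 with rfl | hne
  · rw [List.getD_eq_getElem _ [] (by simpa using hi0'), List.getElem_set_self (by simpa using hi0')]
    rcases eq_or_ne j j0 with rfl | hj
    · have hl : j < ((M.getD i []).set j v).length := by rw [List.length_set, hrow]; omega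
      rw [List.getD_eq_getElem _ _ hl, List.getElem_set_self hl]
      simp
    · simp [hj, List.getD_eq_getElem?_getD, List.getElem?_set_ne (Ne.symm hj)]
  · simp [hne, List.getD_eq_getElem?_getD, List.getElem?_set_ne (fun hh => hne (hh.symm))]

lemma pv_fold_shape_entry (grid : List (List Int)) (min_r min_c : Int) (h w : Nat) :
    ∀ (l : List (Int × Int)) (M : List (List Int)), pvShape M h w →
    (∀ rc ∈ l, min_r ≤ rc.1 ∧ rc.1 - min_r < (h : Int) ∧ min_c ≤ rc.2 ∧ rc.2 - min_c < (w : Int)) →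
    pvShape (l.foldl (pvStepA grid min_r min_c) M) h w ∧
    ∀ i j : Nat, i < h → j < w →
      pvEntry (l.foldl (pvStepA grid min_r min_c) M) i j =
        if (min_r + (i : Int), min_c + (j : Int)) ∈ l then pvRead grid (min_r + i) (min_c + j)
        else pvEntry M i j := by
  intro l
  induction l with
  | nil => intro M hM _; exact ⟨hM, by intro i j _ _; simp⟩
  | cons p l ih =>
    intro M hM hbox
    obtain ⟨hb1, hb2, hb3, hb4⟩ := hbox p List.mem_cons_self
    have hstep : pvStepA grid min_r min_c M p =
        M.set (p.1 - min_r).toNat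
          ((M.getD (p.1 - min_r).toNat []).set (p.2 - min_c).toNat (pvRead grid p.1 p.2)) :=
      pvStepA_eq_set grid min_r min_c M p (by omega) (by rw [hM.1]; omega) (by omega)
    have hi0 : (p.1 - min_r).toNat < h := by omega
    have hj0 : (p.2 - min_c).toNat < w := by omega
    have hshape' : pvShape (pvStepA grid min_r min_c M p) h w := by
      rw [hstep]
      refine ⟨by rw [List.length_set]; exact hM.1, ?_⟩
      intro row hrow
      rcases List.mem_or_eq_of_mem_set hrow with hmem | rfl
      · exact hM.2 row hmem
      · rw [List.length_set]
        rw [List.getD_eq_getElem M [] (by rw [hM.1]; omega)]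
        exact hM.2 _ (List.getElem_mem _)
    obtain ⟨hsh, hent⟩ := ih (pvStepA grid min_r min_c M p) hshape'
      (fun rc hrc => hbox rc (List.mem_cons_of_mem _ hrc))
    refine ⟨by simpa using hsh, ?_⟩
    intro i j hi hj
    rw [List.foldl_cons, hent i j hi hj]
    have hentset : pvEntry (pvStepA grid min_r min_c M p) i j =
        if i = (p.1 - min_r).toNat ∧ j = (p.2 - min_c).toNat then pvRead grid p.1 p.2
        else pvEntry M i j := by
      rw [hstep]; exact pvEntry_set M h w hM _ _ i j hi0 hj0 _
    by_cases hmem : (min_r + (i : Int), min_c + (j : Int)) ∈ l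
    · rw [if_pos hmem, if_pos (List.mem_cons_of_mem _ hmem)]
    · rw [if_neg hmem, hentset]
      by_cases hp : (min_r + (i : Int), min_c + (j : Int)) = p
      · have hr : p.1 = min_r + (i : Int) := by
          have := congrArg Prod.fst hp; simp at this; omega
        have hc : p.2 = min_c + (j : Int) := by
          have := congrArg Prod.snd hp; simp at this; omega
        have h1 : i = (p.1 - min_r).toNat := by omega
        have h2 : j = (p.2 - min_c).toNat := by omega
        rw [if_pos ⟨h1, h2⟩, if_pos (show (min_r + (i : Int), min_c + (j : Int)) ∈ p :: l by
          rw [hp]; exact List.mem_cons_self), hr, hc]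
      · have hnand : ¬ (i = (p.1 - min_r).toNat ∧ j = (p.2 - min_c).toNat) := by
          rintro ⟨rfl, rfl⟩
          exact hp (by rw [show p = (p.1, p.2) from rfl]; congr 1 <;> omega)
        rw [if_neg hnand, if_neg (by simp [List.mem_cons, hp, hmem])]

theorem pv_ports_eq (grid : List (List Int)) (component : List (Int × Int)) (bg_color : Int) :
    extract_object grid component bg_color = extract_object_alt grid component bg_color := by
  by_cases hc : component = []
  · simp [extract_object, extract_object_alt, hc]
  · obtain ⟨mr, hmr⟩ : ∃ m, PySem.List.min? (component.map (fun rc => rc.1)) (fun x => x) = some m := by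
      cases hx : PySem.List.min? (component.map (fun rc => rc.1)) (fun x => x) with
      | none => exact absurd ((PySem.List.min?_eq_none_iff _ _).1 hx) (by simp [hc])
      | some m => exact ⟨m, rfl⟩
    obtain ⟨Mr, hMr⟩ : ∃ m, PySem.List.max? (component.map (fun rc => rc.1)) (fun x => x) = some m := by
      cases hx : PySem.List.max? (component.map (fun rc => rc.1)) (fun x => x) with
      | none => exact absurd ((PySem.List.max?_eq_none_iff _ _).1 hx) (by simp [hc])
      | some m => exact ⟨m, rfl⟩
    obtain ⟨mc, hmc⟩ : ∃ m, PySem.List.min? (component.map (fun rc => rc.2)) (fun x => x) = some m := by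
      cases hx : PySem.List.min? (component.map (fun rc => rc.2)) (fun x => x) with
      | none => exact absurd ((PySem.List.min?_eq_none_iff _ _).1 hx) (by simp [hc])
      | some m => exact ⟨m, rfl⟩
    obtain ⟨Mc, hMc⟩ : ∃ m, PySem.List.max? (component.map (fun rc => rc.2)) (fun x => x) = some m := by
      cases hx : PySem.List.max? (component.map (fun rc => rc.2)) (fun x => x) with
      | none => exact absurd ((PySem.List.max?_eq_none_iff _ _).1 hx) (by simp [hc])
      | some m => exact ⟨m, rfl⟩
    have hbox : ∀ rc ∈ component, mr ≤ rc.1 ∧ rc.1 ≤ Mr ∧ mc ≤ rc.2 ∧ rc.2 ≤ Mc := by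
      intro rc hrc
      exact ⟨PySem.List.min?_isMin hmr _ (List.mem_map_of_mem hrc),
             PySem.List.max?_isMax hMr _ (List.mem_map_of_mem hrc),
             PySem.List.min?_isMin hmc _ (List.mem_map_of_mem hrc),
             PySem.List.max?_isMax hMc _ (List.mem_map_of_mem hrc)⟩
    have hmrMr : mr ≤ Mr := PySem.List.max?_isMax hMr _ (PySem.List.min?_mem hmr)
    have hmcMc : mc ≤ Mc := PySem.List.max?_isMax hMc _ (PySem.List.min?_mem hmc)
    set H : Nat := (Mr - mr + 1).toNat with hH
    set W : Nat := (Mc - mc + 1).toNat with hW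
    have hHi : ((H : Int)) = Mr - mr + 1 := by omega
    have hWi : ((W : Int)) = Mc - mc + 1 := by omega
    -- the initial matrix of A
    set init : List (List Int) :=
      (PySem.List.pyRange 0 (Mr - mr + 1) 1).map (fun _ => PySem.List.pyRepeat [bg_color] (Mc - mc + 1)) with hinit
    have hinit_shape : pvShape init H W := by
      constructor
      · simp [hinit, PySem.List.length_pyRange_one]; omega
      · intro row hrow
        simp only [hinit, List.mem_map] at hrow
        obtain ⟨_, _, rfl⟩ := hrow
        simp [PySem.List.pyRepeat_singleton]; omega
    have hinit_entry : ∀ i j : Nat, i < H → j < W → pvEntry init i j = bg_color := by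
      intro i j hi hj
      have hi' : i < init.length := by rw [hinit_shape.1]; omega
      unfold pvEntry
      rw [List.getD_eq_getElem init [] hi']
      simp only [hinit, List.getElem_map, PySem.List.pyRepeat_singleton]
      rw [List.getD_eq_getElem _ _ (by simp; omega)]
      simp
    obtain ⟨hAshape, hAentry⟩ := pv_fold_shape_entry grid mr mc H W component init hinit_shape
      (by intro rc hrc; obtain ⟨a, b, c, d⟩ := hbox rc hrc; omega)
    -- unfold both sides
    show extract_object grid component bg_color = extract_object_alt grid component bg_color
    simp only [extract_object, extract_object_alt, if_neg hc, hmr, hMr, hmc, hMc, Option.getD_some]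
    rw [← hinit]
    -- B's description
    set A := component.foldl (pvStepA grid mr mc) init with hA
    set B := (PySem.List.pyRange mr (Mr + 1) 1).map (fun r =>
      (PySem.List.pyRange mc (Mc + 1) 1).map (fun c =>
        if (r, c) ∈ component then PySem.List.pyGetD (PySem.List.pyGetD grid r []) c 0 else bg_color)) with hB
    have hBlen : B.length = H := by simp [hB, PySem.List.length_pyRange_one]; omega
    have hAlen : A.length = H := hAshape.1
    apply List.ext_getElem (by omega)
    intro i hiA hiB
    have hi : i < H := by omega
    have hBrow : B[i] = (PySem.List.pyRange mc (Mc + 1) 1).map (fun c =>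
        if (mr + (i : Int), c) ∈ component then PySem.List.pyGetD (PySem.List.pyGetD grid (mr + (i : Int)) []) c 0 else bg_color) := by
      simp only [hB, List.getElem_map]
      rw [PySem.List.getElem_pyRange_one]
    have hArowlen : A[i].length = W := hAshape.2 _ (List.getElem_mem hiA)
    have hBrowlen : B[i].length = W := by
      rw [hBrow]; simp [PySem.List.length_pyRange_one]; omega
    apply List.ext_getElem (by omega)
    intro j hjA hjB
    have hj : j < W := by omega
    have hentA : A[i][j] = pvEntry A i j := by
      unfold pvEntry
      rw [List.getD_eq_getElem A [] hiA, List.getD_eq_getElem _ _ (by omega)]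
    rw [hentA, hAentry i j hi hj, hinit_entry i j hi hj]
    simp only [hB, List.getElem_map]
    simp only [PySem.List.getElem_pyRange_one]
    rfl

-- ===== VERDICT (by name: the statement is the Claim_ definition above) =====
theorem extract_object_spec : Claim_equal_extract_object := by
  intro grid component bg_color _ _
  unfold Spec_extract_object
  exact pv_ports_eq grid component bg_color
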